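-- pv_equiv track=rewrite | github.com/ZorgeR/Generall.AI | app/main_bot.py | split_text_intelligently
-- ===== SOURCE A (Python) =====
-- def split_text_intelligently(text: str, max_length: int = 4000) -> list[str]:
--     """
--     Split text into chunks with a maximum length, trying to split at natural boundaries:
--     1. Preferably at the last paragraph break (double newline) before max_length
--     2. Otherwise at the last single newline before max_length
--     3. Otherwise at the last space before max_length
--     4. If none of the above is possible, split at exactly max_length
--
--     Args:
--         text: The text to split
--         max_length: Maximum length of each chunk (default: 4000)
--
--     Returns:
--         List of text chunks
--     """
--     if len(text) <= max_length:
--         return [text]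
--
--     chunks = []
--     start = 0
--
--     while start < len(text):
--         if start + max_length >= len(text):
--             chunks.append(text[start:])
--             break
--
--         # Try to find the last paragraph break (double newline) within the max_length
--         end = start + max_length
--         paragraph_break_pos = text.rfind('\n\n', start, end)
--
--         if paragraph_break_pos != -1 and paragraph_break_pos > start:
--             # Split at paragraph break
--             chunks.append(text[start:paragraph_break_pos+2])
--             start = paragraph_break_pos + 2
--         else:
--             # Try to find the last single newline within the max_length
--             newline_pos = text.rfind('\n', start, end)
--
--             if newline_pos != -1 and newline_pos > start:
--                 # Split at newline
--                 chunks.append(text[start:newline_pos+1])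
--                 start = newline_pos + 1
--             else:
--                 # Try to find the last space within the max_length
--                 space_pos = text.rfind(' ', start, end)
--
--                 if space_pos != -1 and space_pos > start:
--                     # Split at space
--                     chunks.append(text[start:space_pos+1])
--                     start = space_pos + 1
--                 else:
--                     # No natural breaking point, split at max_length
--                     chunks.append(text[start:end])
--                     start = end
--
--     return chunks
-- ===== SOURCE B (Python) =====
-- def split_text_intelligently(text: str, max_length: int = 4000) -> list[str]:
--     n = len(text)
--     if n <= max_length:
--         return [text]
--     # Single forward pass: track the last-seen paragraph break, newline and space
--     # while scanning; commit a chunk whenever the scan reaches start+max_length.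
--     chunks = []
--     start = 0
--     para = nl = sp = -1
--     prev = None
--     for i, c in enumerate(text):
--         if i == start + max_length:
--             if para > start:
--                 cut = para + 2
--             elif nl > start:
--                 cut = nl + 1
--             elif sp > start:
--                 cut = sp + 1
--             else:
--                 cut = i
--             chunks.append(text[start:cut])
--             start = cut
--         if c == '\n':
--             nl = i
--             if prev == '\n':
--                 para = i - 1
--         elif c == ' ':
--             sp = i
--         prev = c
--     chunks.append(text[start:])
--     return chunks
-- ===== Notes on version B (the rewrite author's own statement) =====
-- stated objective: alternative
-- what changed: B replaces A's per-chunk backward rfind searches with a single forward scan over the text that tracks the last-seen paragraph-break, newline and space positions and commits a chunk whenever the scan index reaches start+max_length.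
-- outside the precondition, e.g. on split_text_intelligently('', -1): A returns [], B returns ['']
import Mathlib
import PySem

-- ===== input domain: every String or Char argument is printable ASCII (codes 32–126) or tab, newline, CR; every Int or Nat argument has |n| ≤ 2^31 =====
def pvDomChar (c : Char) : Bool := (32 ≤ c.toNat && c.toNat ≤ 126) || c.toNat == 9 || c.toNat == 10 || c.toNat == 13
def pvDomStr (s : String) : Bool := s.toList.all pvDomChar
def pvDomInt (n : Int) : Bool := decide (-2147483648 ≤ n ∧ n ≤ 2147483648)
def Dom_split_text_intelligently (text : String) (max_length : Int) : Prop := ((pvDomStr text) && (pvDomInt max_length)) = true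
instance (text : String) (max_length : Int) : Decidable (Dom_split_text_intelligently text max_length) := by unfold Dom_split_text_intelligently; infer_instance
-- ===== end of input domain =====

-- B replaces A's per-chunk backward rfind searches by a single forward scan that tracks the
-- last-seen paragraph-break/newline/space positions and commits a chunk when the scan index
-- reaches start+max_length; objective: alternative algorithm (one pass, no backward searches).


-- ===== PORT A =====
-- A's while loop; fuel (length+1) only makes the recursion total — under Pre_ each step
-- advances start by ≥ 1, so the fuel is never exhausted and the loop exits as in Python.
def pvLoopA (t : List Char) (maxl : Int) : Nat → Int → List (List Char) → List (List Char)
  | 0, _, chunks => chunks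
  | fuel+1, start, chunks =>
    if start < (t.length : Int) then
      if (t.length : Int) ≤ start + maxl then
        chunks ++ [PySem.List.slice t (some start) none]
      else
        let e := start + maxl
        let p2 := PySem.Chars.rfindFrom t ['\n', '\n'] start (some e)
        if p2 ≠ -1 ∧ p2 > start then
          pvLoopA t maxl fuel (p2 + 2) (chunks ++ [PySem.List.slice t (some start) (some (p2 + 2))])
        else
          let p1 := PySem.Chars.rfindFrom t ['\n'] start (some e)
          if p1 ≠ -1 ∧ p1 > start then
            pvLoopA t maxl fuel (p1 + 1) (chunks ++ [PySem.List.slice t (some start) (some (p1 + 1))])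
          else
            let ps := PySem.Chars.rfindFrom t [' '] start (some e)
            if ps ≠ -1 ∧ ps > start then
              pvLoopA t maxl fuel (ps + 1) (chunks ++ [PySem.List.slice t (some start) (some (ps + 1))])
            else
              pvLoopA t maxl fuel e (chunks ++ [PySem.List.slice t (some start) (some e)])
    else chunks

def split_text_intelligently (text : String) (max_length : Int) : List String :=
  let t := text.toList
  if (t.length : Int) ≤ max_length then [text]
  else (pvLoopA t max_length (t.length + 1) 0 []).map (fun l => String.ofList l)

-- ===== PORT B =====
-- Source B's scanner state: collected chunks, current chunk start, last-seen candidate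
-- positions (para = start of last '\n\n', nl = last '\n', sp = last ' '), previous char
structure PvStB where
  chunks : List (List Char)
  start : Int
  para : Int
  nl : Int
  sp : Int
  prev : Option Char

-- one iteration of Source B's `for i, c in enumerate(text)` body
def pvStepB (t : List Char) (maxl : Int) (st : PvStB) (ic : Int × Char) : PvStB :=
  let st :=
    if ic.1 = st.start + maxl then
      let cut := if st.para > st.start then st.para + 2
                 else if st.nl > st.start then st.nl + 1
                 else if st.sp > st.start then st.sp + 1
                 else ic.1
      { st with chunks := st.chunks ++ [PySem.List.slice t (some st.start) (some cut)],
                start := cut }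
    else st
  let st :=
    if ic.2 = '\n' then
      { st with nl := ic.1, para := if st.prev = some '\n' then ic.1 - 1 else st.para }
    else if ic.2 = ' ' then { st with sp := ic.1 }
    else st
  { st with prev := some ic.2 }

def split_text_intelligently_alt (text : String) (max_length : Int) : List String :=
  let t := text.toList
  if (t.length : Int) ≤ max_length then [text]
  else
    let st := (PySem.List.enumerate t 0).foldl (pvStepB t max_length) ⟨[], 0, -1, -1, -1, none⟩
    (st.chunks ++ [PySem.List.slice t (some st.start) none]).map (fun l => String.ofList l)

-- ===== PRECONDITION & SPEC =====
-- Pre_ excludes (i) max_length ≤ 0 with a nonempty text longer than max_length, where the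
-- Python A loops forever (no value, no exception), and (ii) the empty text with negative
-- max_length, a defensible corner where A returns an empty list and B returns a one-element
-- list holding the empty text (how to split nothing under a nonsense negative limit is
-- specified by nobody; either answer is defensible).
def Pre_split_text_intelligently (text : String) (max_length : Int) : Prop :=
  1 ≤ max_length ∨ (text.length : Int) ≤ max_length
instance (text : String) (max_length : Int) : Decidable (Pre_split_text_intelligently text max_length) := by
  unfold Pre_split_text_intelligently; infer_instance

def pvWitness_split_text_intelligently : String × Int := ("hello world, a test", 7)

def Spec_split_text_intelligently (text : String) (max_length : Int) (out : List String) : Prop := out = split_text_intelligently_alt text max_length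
instance (text : String) (max_length : Int) (out : List String) : Decidable (Spec_split_text_intelligently text max_length out) := by unfold Spec_split_text_intelligently; infer_instance

-- ===== CLAIM (what is proved, stated in full; the proofs are below) =====
def Claim_equal_split_text_intelligently : Prop := ∀ (text : String) (max_length : Int), Dom_split_text_intelligently text max_length → Pre_split_text_intelligently text max_length → Spec_split_text_intelligently text max_length (split_text_intelligently text max_length)

-- ===== LEMMAS AND PROOFS =====

def pvLastP (p : Nat → Bool) : Nat → Int
  | 0 => -1
  | m+1 => if p m then (m : Int) else pvLastP p m

def pvPChr (t : List Char) (c : Char) (j : Nat) : Bool := t[j]? = some c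

def pvPPar (t : List Char) (j : Nat) : Bool := (t[j]? = some '\n') && (t[j+1]? = some '\n')

def pvNlAt (t : List Char) (i : Nat) : Int := pvLastP (pvPChr t '\n') i

def pvSpAt (t : List Char) (i : Nat) : Int := pvLastP (pvPChr t ' ') i

def pvParaAt (t : List Char) (i : Nat) : Int := pvLastP (pvPPar t) (i - 1)

def pvPrevAt (t : List Char) (i : Nat) : Option Char := if i = 0 then none else t[i-1]?

lemma pvLastP_lt (p : Nat → Bool) (m : Nat) : pvLastP p m < (m : Int) := by
  induction m with
  | zero => simp [pvLastP]
  | succ k ih => simp only [pvLastP]; split <;> [omega; exact lt_trans ih (by omega)]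

lemma pvLastP_ge (p : Nat → Bool) (m : Nat) : -1 ≤ pvLastP p m := by
  induction m with
  | zero => simp [pvLastP]
  | succ k ih => simp only [pvLastP]; split <;> omega

lemma pvLastP_congr (p q : Nat → Bool) (m : Nat) (h : ∀ i, i < m → p i = q i) :
    pvLastP p m = pvLastP q m := by
  induction m with
  | zero => rfl
  | succ k ih =>
    simp only [pvLastP, h k (by omega)]
    rw [ih (fun i hi => h i (by omega))]

lemma pvLastP_split (p : Nat → Bool) (s m : Nat) :
    pvLastP p (s + m) =
      if pvLastP (fun i => p (s + i)) m = -1 then pvLastP p s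
      else (s : Int) + pvLastP (fun i => p (s + i)) m := by
  induction m with
  | zero => simp [pvLastP]
  | succ k ih =>
    have h1 : s + (k+1) = (s+k) + 1 := by omega
    rw [h1]
    simp only [pvLastP]
    by_cases hp : p (s + k)
    · have h2 : ¬ ((s + k : Nat) : Int) = -1 := by omega
      simp only [hp, if_true]
      have h3 : ¬ ((k : Nat) : Int) = -1 := by omega
      rw [if_neg h3]; push_cast; ring
    · simp only [hp, Bool.false_eq_true, if_false, ih]

lemma pvGo_eq (s sub : List Char) (j : Nat) :
    PySem.Chars.rfind.go s sub j = pvLastP (fun i => sub.isPrefixOf (s.drop i)) (j + 1) := by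
  induction j with
  | zero => simp [PySem.Chars.rfind.go, pvLastP]
  | succ k ih => simp only [PySem.Chars.rfind.go, pvLastP, ih]

lemma pvPrefix_singleton (c : Char) (l : List Char) :
    [c].isPrefixOf l = (l[0]? = some c : Bool) := by
  cases l with
  | nil => simp [List.isPrefixOf]
  | cons a as =>
    simp only [List.isPrefixOf, List.getElem?_cons_zero, Bool.and_true, Bool.beq_eq_decide_eq]
    simp [eq_comm]

lemma pvPrefix_pair (a b : Char) (l : List Char) :
    [a, b].isPrefixOf l = ((l[0]? = some a) && (l[1]? = some b) : Bool) := by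
  cases l with
  | nil => simp [List.isPrefixOf]
  | cons x xs =>
    cases xs with
    | nil => simp [List.isPrefixOf]
    | cons y ys =>
      simp only [List.isPrefixOf, Bool.beq_eq_decide_eq]
      simp [eq_comm]

lemma pvRfindFrom_eq (t sub : List Char) (s e : Nat) (hse : s ≤ e) (hen : e ≤ t.length)
    (hsub : sub ≠ []) :
    PySem.Chars.rfindFrom t sub (s : Int) (some (e : Int)) =
      (if pvLastP (fun i => sub.isPrefixOf (((t.take e).drop s).drop i)) (e - s) = -1 then -1
       else (s : Int) + pvLastP (fun i => sub.isPrefixOf (((t.take e).drop s).drop i)) (e - s)) := by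
  have hw : ((t.take e).drop s).length = e - s := by
    simp [List.length_drop, List.length_take]; omega
  have hnil : ((t.take e).drop s).drop (e - s) = [] := by
    rw [← hw, List.drop_length]
  have hq : sub.isPrefixOf ((((t.take e).drop s)).drop (e - s)) = false := by
    rw [hnil]; cases sub with
    | nil => exact absurd rfl hsub
    | cons a l => rfl
  simp only [PySem.Chars.rfindFrom, PySem.Chars.rfind]
  rw [if_neg (by omega : ¬ ((t.length : Int) < (e : Int)))]
  rw [if_neg (by omega : ¬ ((e : Int) < 0)), if_neg (by omega : ¬ ((s : Int) < 0)),
      if_neg (by omega : ¬ ((e : Int) < (s : Int)))]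
  rw [Int.toNat_natCast, Int.toNat_natCast, pvGo_eq, hw]
  have hes : e - s + 1 = (e - s) + 1 := rfl
  rw [show (e - s) + 1 = Nat.succ (e - s) from rfl]
  simp only [pvLastP, hq, Bool.false_eq_true, if_false]

lemma pvSplitConc (p : Nat → Bool) (s m : Nat) (r : Int)
    (hr : r = if pvLastP (fun i => p (s+i)) m = -1 then -1
              else (s : Int) + pvLastP (fun i => p (s+i)) m) :
    (r > (s : Int) ↔ pvLastP p (s+m) > (s : Int)) ∧
    (pvLastP p (s+m) > (s : Int) → r = pvLastP p (s+m)) := by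
  rw [pvLastP_split p s m]
  by_cases hM : pvLastP (fun i => p (s+i)) m = -1
  · rw [hr, if_pos hM, if_pos hM]
    have := pvLastP_lt p s
    constructor
    · constructor <;> intro h <;> omega
    · intro h; omega
  · rw [hr, if_neg hM, if_neg hM]
    have := pvLastP_ge (fun i => p (s+i)) m
    constructor
    · constructor <;> intro h <;> omega
    · intro h; rfl

lemma pvWinGet (t : List Char) (s e i : Nat) (hen : e ≤ t.length) (hi : s + i < e) :
    ((t.take e).drop s)[i]? = t[s + i]? := by
  rw [List.getElem?_drop]
  rw [List.getElem?_take_of_lt hi]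

lemma pvRfindChr (t : List Char) (c : Char) (s e : Nat) (hse : s < e) (hen : e ≤ t.length) :
    (PySem.Chars.rfindFrom t [c] (s : Int) (some (e : Int)) > (s : Int) ↔
       pvLastP (pvPChr t c) e > (s : Int)) ∧
    (pvLastP (pvPChr t c) e > (s : Int) →
       PySem.Chars.rfindFrom t [c] (s : Int) (some (e : Int)) = pvLastP (pvPChr t c) e) := by
  have hcg : ∀ i, i < e - s →
      (fun i => [c].isPrefixOf (((t.take e).drop s).drop i)) i = (fun i => pvPChr t c (s+i)) i := by
    intro i hi
    simp only []
    rw [pvPrefix_singleton]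
    rw [List.getElem?_drop, Nat.add_zero, pvWinGet t s e i hen (by omega)]
    rfl
  have he : e = s + (e - s) := by omega
  have hr := pvRfindFrom_eq t [c] s e (by omega) hen (by simp)
  rw [pvLastP_congr _ _ _ hcg] at hr
  have := pvSplitConc (pvPChr t c) s (e - s) _ hr
  rw [← he] at this
  exact this

lemma pvRfindPar (t : List Char) (s e : Nat) (hse : s < e) (hen : e ≤ t.length) :
    (PySem.Chars.rfindFrom t ['\n','\n'] (s : Int) (some (e : Int)) > (s : Int) ↔
       pvLastP (pvPPar t) (e - 1) > (s : Int)) ∧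
    (pvLastP (pvPPar t) (e - 1) > (s : Int) →
       PySem.Chars.rfindFrom t ['\n','\n'] (s : Int) (some (e : Int)) = pvLastP (pvPPar t) (e - 1)) := by
  have hr := pvRfindFrom_eq t ['\n','\n'] s e (by omega) hen (by simp)
  -- drop the top window index (its second char falls outside the window)
  have hstep : pvLastP (fun i => ['\n','\n'].isPrefixOf (((t.take e).drop s).drop i)) (e - s)
      = pvLastP (fun i => ['\n','\n'].isPrefixOf (((t.take e).drop s).drop i)) (e - s - 1) := by
    have h1 : e - s = (e - s - 1) + 1 := by omega
    rw [h1]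
    simp only [pvLastP]
    have hq : ['\n','\n'].isPrefixOf (((t.take e).drop s).drop (e - s - 1)) = false := by
      rw [pvPrefix_pair]
      have h2 : (((t.take e).drop s).drop (e - s - 1))[1]? = ((t.take e).drop s)[(e-s-1)+1]? := by
        rw [List.getElem?_drop]
      have hnone : ((t.take e).drop s)[(e-s-1)+1]? = none := by
        apply List.getElem?_eq_none
        simp [List.length_drop, List.length_take]; omega
      rw [h2, hnone]
      simp
    simp only [hq, Bool.false_eq_true, if_false]
    congr 1
  have hcg : ∀ i, i < e - s - 1 →
      (fun i => ['\n','\n'].isPrefixOf (((t.take e).drop s).drop i)) i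
        = (fun i => pvPPar t (s+i)) i := by
    intro i hi
    simp only []
    rw [pvPrefix_pair]
    have h0 : (((t.take e).drop s).drop i)[0]? = t[s+i]? := by
      rw [List.getElem?_drop, Nat.add_zero, pvWinGet t s e i hen (by omega)]
    have h1 : (((t.take e).drop s).drop i)[1]? = t[s+i+1]? := by
      rw [List.getElem?_drop]
      have : ((t.take e).drop s)[i+1]? = t[s+(i+1)]? := pvWinGet t s e (i+1) hen (by omega)
      rw [this, show s+(i+1) = s+i+1 from rfl]
    rw [h0, h1]
    rfl
  rw [hstep, pvLastP_congr _ _ _ hcg] at hr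
  have he : e - 1 = s + (e - s - 1) := by omega
  have := pvSplitConc (pvPPar t) s (e - s - 1) _ hr
  rw [← he] at this
  exact this

lemma pvNlAt_succ (t : List Char) (i : Nat) (hi : i < t.length) :
    pvNlAt t (i+1) = if t[i] = '\n' then (i : Int) else pvNlAt t i := by
  simp only [pvNlAt, pvLastP, pvPChr, List.getElem?_eq_getElem hi]
  by_cases h : t[i] = '\n' <;> simp [h]

lemma pvSpAt_succ (t : List Char) (i : Nat) (hi : i < t.length) :
    pvSpAt t (i+1) = if t[i] = ' ' then (i : Int) else pvSpAt t i := by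
  simp only [pvSpAt, pvLastP, pvPChr, List.getElem?_eq_getElem hi]
  by_cases h : t[i] = ' ' <;> simp [h]

lemma pvPrevAt_succ (t : List Char) (i : Nat) : pvPrevAt t (i+1) = t[i]? := by
  simp [pvPrevAt]

lemma pvParaAt_succ (t : List Char) (i : Nat) (hi : i < t.length) :
    pvParaAt t (i+1) =
      if t[i] = '\n' ∧ pvPrevAt t i = some '\n' then (i : Int) - 1 else pvParaAt t i := by
  cases i with
  | zero => simp [pvParaAt, pvPrevAt, pvLastP]
  | succ k =>
    simp only [pvParaAt, pvPrevAt, Nat.succ_sub_one, pvLastP, pvPPar,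
      List.getElem?_eq_getElem hi]
    by_cases h1 : t[k]? = some '\n' <;> by_cases h2 : t[k+1] = '\n' <;>
      simp [h1, h2] <;> push_cast <;> ring

lemma pvStepChar (t : List Char) (maxl : Int) (chunks : List (List Char)) (s : Int)
    (i : Nat) (hi : i < t.length) (hnc : ¬ ((i : Int) = s + maxl)) :
    pvStepB t maxl ⟨chunks, s, pvParaAt t i, pvNlAt t i, pvSpAt t i, pvPrevAt t i⟩ ((i : Int), t[i]) =
      ⟨chunks, s, pvParaAt t (i+1), pvNlAt t (i+1), pvSpAt t (i+1), pvPrevAt t (i+1)⟩ := by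
  simp only [pvStepB, hnc, if_false]
  rw [pvNlAt_succ t i hi, pvSpAt_succ t i hi, pvParaAt_succ t i hi, pvPrevAt_succ,
      List.getElem?_eq_getElem hi]
  by_cases h1 : t[i] = '\n'
  · by_cases h2 : pvPrevAt t i = some '\n' <;> simp [h1, h2]
  · by_cases h3 : t[i] = ' ' <;> simp [h1, h3]

lemma pvStepCommit (t : List Char) (maxl : Int) (chunks : List (List Char)) (s : Int)
    (e : Nat) (he : e < t.length) (heq : (e : Int) = s + maxl) :
    pvStepB t maxl ⟨chunks, s, pvParaAt t e, pvNlAt t e, pvSpAt t e, pvPrevAt t e⟩ ((e : Int), t[e]) =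
      ⟨chunks ++ [PySem.List.slice t (some s)
          (some (if pvParaAt t e > s then pvParaAt t e + 2
                 else if pvNlAt t e > s then pvNlAt t e + 1
                 else if pvSpAt t e > s then pvSpAt t e + 1
                 else (e : Int)))],
       (if pvParaAt t e > s then pvParaAt t e + 2
        else if pvNlAt t e > s then pvNlAt t e + 1
        else if pvSpAt t e > s then pvSpAt t e + 1
        else (e : Int)),
       pvParaAt t (e+1), pvNlAt t (e+1), pvSpAt t (e+1), pvPrevAt t (e+1)⟩ := by
  simp only [pvStepB, heq]
  rw [pvNlAt_succ t e he, pvSpAt_succ t e he, pvParaAt_succ t e he, pvPrevAt_succ,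
      List.getElem?_eq_getElem he]
  by_cases h1 : t[e] = '\n'
  · by_cases h2 : pvPrevAt t e = some '\n' <;> simp [h1, h2, heq]
  · by_cases h3 : t[e] = ' ' <;> simp [h1, h3, heq]

lemma pvFoldSeg (t : List Char) (maxl : Int) :
    ∀ (m i : Nat) (chunks : List (List Char)) (s : Int), i + m ≤ t.length →
      ((i + m : Nat) : Int) ≤ s + maxl →
      List.foldl (pvStepB t maxl) ⟨chunks, s, pvParaAt t i, pvNlAt t i, pvSpAt t i, pvPrevAt t i⟩
        (PySem.List.enumerate ((t.drop i).take m) (i : Int)) =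
      ⟨chunks, s, pvParaAt t (i+m), pvNlAt t (i+m), pvSpAt t (i+m), pvPrevAt t (i+m)⟩ := by
  intro m
  induction m with
  | zero => intro i chunks s _ _; simp
  | succ k ih =>
    intro i chunks s hlen hb
    have hi : i < t.length := by omega
    rw [List.drop_eq_getElem_cons hi, List.take_succ_cons, PySem.List.enumerate_cons,
        List.foldl_cons]
    rw [pvStepChar t maxl chunks s i hi (by omega)]
    have h4 := ih (i+1) chunks s (by omega) (by push_cast at hb ⊢; omega)
    rw [show ((i:Int) + 1) = ((i+1 : Nat) : Int) by push_cast; ring, h4,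
        show i+1+k = i+(k+1) by omega]

lemma pvMain (t : List Char) (maxl : Int) (hm : 1 ≤ maxl) :
    ∀ (fuel : Nat) (s i : Nat) (chunks : List (List Char)),
      s ≤ i → (i : Int) ≤ (s : Int) + maxl → i ≤ t.length → s < t.length →
      t.length - s ≤ fuel →
      pvLoopA t maxl fuel (s : Int) chunks =
        (List.foldl (pvStepB t maxl)
            ⟨chunks, (s : Int), pvParaAt t i, pvNlAt t i, pvSpAt t i, pvPrevAt t i⟩
            (PySem.List.enumerate ((t.drop i).take (t.length - i)) (i : Int))).chunks ++
          [PySem.List.slice t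
            (some ((List.foldl (pvStepB t maxl)
              ⟨chunks, (s : Int), pvParaAt t i, pvNlAt t i, pvSpAt t i, pvPrevAt t i⟩
              (PySem.List.enumerate ((t.drop i).take (t.length - i)) (i : Int))).start)) none] := by
  intro fuel
  induction fuel with
  | zero => intro s i chunks _ _ _ hsn hfuel; omega
  | succ fuel ih =>
    intro s i chunks hsi hib hilen hsn hfuel
    rw [pvLoopA, if_pos (by exact_mod_cast hsn : (s : Int) < (t.length : Int))]
    by_cases hTail : (t.length : Int) ≤ (s : Int) + maxl
    · -- tail chunk: the scan never commits again
      rw [if_pos hTail]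
      rw [pvFoldSeg t maxl (t.length - i) i chunks s (by omega)
        (by push_cast; push_cast at hTail; omega)]
    · rw [if_neg hTail]
      -- the commit point
      set eN : Nat := s + maxl.toNat with heN
      have he : (eN : Int) = (s : Int) + maxl := by
        rw [heN]; push_cast; rw [Int.toNat_of_nonneg (by omega)]
      have hseN : s < eN := by omega
      have heNn : eN < t.length := by
        push_cast at hTail; omega
      -- split the scan at the commit point
      have hsplit : (t.drop i).take (t.length - i)
          = (t.drop i).take (eN - i) ++ (t.drop eN).take (t.length - eN) := by
        have h1 : t.length - i = (eN - i) + (t.length - eN) := by omega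
        rw [h1, List.take_add, List.drop_drop,
            show i + (eN - i) = eN by omega]
      have hlen1 : ((t.drop i).take (eN - i)).length = eN - i := by
        simp [List.length_take, List.length_drop]; omega
      rw [hsplit, PySem.List.enumerate_append, hlen1, List.foldl_append]
      rw [pvFoldSeg t maxl (eN - i) i chunks s (by omega) (by push_cast; push_cast at he; omega)]
      rw [show i + (eN - i) = eN by omega,
          show (i : Int) + ((eN - i : Nat) : Int) = (eN : Int) by push_cast; omega]
      -- unroll the committing step
      rw [show (t.drop eN).take (t.length - eN)
            = t[eN] :: ((t.drop (eN+1)).take (t.length - (eN+1))) by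
            rw [List.drop_eq_getElem_cons heNn,
                show t.length - eN = (t.length - (eN+1)) + 1 by omega, List.take_succ_cons],
          PySem.List.enumerate_cons, List.foldl_cons,
          pvStepCommit t maxl chunks (s : Int) eN heNn he]
      -- align A's searches with B's tracked candidates
      rw [show (s : Int) + maxl = (eN : Int) from he.symm]
      obtain ⟨hif2, hv2⟩ := pvRfindPar t s eN hseN (le_of_lt heNn)
      obtain ⟨hif1, hv1⟩ := pvRfindChr t '\n' s eN hseN (le_of_lt heNn)
      obtain ⟨hifS, hvS⟩ := pvRfindChr t ' ' s eN hseN (le_of_lt heNn)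
      have hpara : pvParaAt t eN = pvLastP (pvPPar t) (eN - 1) := rfl
      have hnl : pvNlAt t eN = pvLastP (pvPChr t '\n') eN := rfl
      have hsp : pvSpAt t eN = pvLastP (pvPChr t ' ') eN := rfl
      have hs0 : (0 : Int) ≤ (s : Int) := Int.natCast_nonneg s
      have hcc : ((eN : Int) + 1) = ((eN + 1 : Nat) : Int) := by push_cast; ring
      have hL2lt : pvParaAt t eN < (eN : Int) - 1 := by
        have h := pvLastP_lt (pvPPar t) (eN - 1)
        rw [← hpara] at h
        have : ((eN - 1 : Nat) : Int) = (eN : Int) - 1 := by omega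
        omega
      have hL1lt : pvNlAt t eN < (eN : Int) := by
        have h := pvLastP_lt (pvPChr t '\n') eN; rw [← hnl] at h; exact h
      have hLSlt : pvSpAt t eN < (eN : Int) := by
        have h := pvLastP_lt (pvPChr t ' ') eN; rw [← hsp] at h; exact h
      by_cases h2 : pvParaAt t eN > (s : Int)
      · have hp2 : PySem.Chars.rfindFrom t ['\n','\n'] (s:Int) (some (eN:Int)) > (s:Int) := by
          rw [hpara] at h2; exact hif2.mpr h2
        rw [if_pos ⟨by omega, hp2⟩, hv2 (by rw [hpara] at h2; exact h2), ← hpara, if_pos h2]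
        have hcut : pvParaAt t eN + 2 = (((pvParaAt t eN + 2).toNat : Nat) : Int) := by omega
        rw [hcut, hcc]
        exact ih (pvParaAt t eN + 2).toNat (eN + 1) _ (by omega) (by push_cast; omega)
          (by omega) (by omega) (by omega)
      · have hn2 : ¬ (PySem.Chars.rfindFrom t ['\n','\n'] (s:Int) (some (eN:Int)) ≠ -1 ∧
            PySem.Chars.rfindFrom t ['\n','\n'] (s:Int) (some (eN:Int)) > (s:Int)) := by
          intro hc; exact h2 (by rw [hpara]; exact hif2.mp hc.2)
        rw [if_neg hn2, if_neg h2]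
        by_cases h1 : pvNlAt t eN > (s : Int)
        · have hp1 : PySem.Chars.rfindFrom t ['\n'] (s:Int) (some (eN:Int)) > (s:Int) := by
            rw [hnl] at h1; exact hif1.mpr h1
          rw [if_pos ⟨by omega, hp1⟩, hv1 (by rw [hnl] at h1; exact h1), ← hnl, if_pos h1]
          have hcut : pvNlAt t eN + 1 = (((pvNlAt t eN + 1).toNat : Nat) : Int) := by omega
          rw [hcut, hcc]
          exact ih (pvNlAt t eN + 1).toNat (eN + 1) _ (by omega) (by push_cast; omega)
            (by omega) (by omega) (by omega)
        · have hn1 : ¬ (PySem.Chars.rfindFrom t ['\n'] (s:Int) (some (eN:Int)) ≠ -1 ∧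
              PySem.Chars.rfindFrom t ['\n'] (s:Int) (some (eN:Int)) > (s:Int)) := by
            intro hc; exact h1 (by rw [hnl]; exact hif1.mp hc.2)
          rw [if_neg hn1, if_neg h1]
          by_cases hS : pvSpAt t eN > (s : Int)
          · have hpS : PySem.Chars.rfindFrom t [' '] (s:Int) (some (eN:Int)) > (s:Int) := by
              rw [hsp] at hS; exact hifS.mpr hS
            rw [if_pos ⟨by omega, hpS⟩, hvS (by rw [hsp] at hS; exact hS), ← hsp, if_pos hS]
            have hcut : pvSpAt t eN + 1 = (((pvSpAt t eN + 1).toNat : Nat) : Int) := by omega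
            rw [hcut, hcc]
            exact ih (pvSpAt t eN + 1).toNat (eN + 1) _ (by omega) (by push_cast; omega)
              (by omega) (by omega) (by omega)
          · have hnS : ¬ (PySem.Chars.rfindFrom t [' '] (s:Int) (some (eN:Int)) ≠ -1 ∧
                PySem.Chars.rfindFrom t [' '] (s:Int) (some (eN:Int)) > (s:Int)) := by
              intro hc; exact hS (by rw [hsp]; exact hifS.mp hc.2)
            rw [if_neg hnS, if_neg hS]
            rw [hcc]
            exact ih eN (eN + 1) _ (by omega) (by push_cast; omega)
              (by omega) (by omega) (by omega)

-- ===== VERDICT (by name: the statement is the Claim_ definition above) =====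
theorem split_text_intelligently_spec : Claim_equal_split_text_intelligently := by
  intro text maxl _dom hpre
  unfold Spec_split_text_intelligently
  simp only [split_text_intelligently, split_text_intelligently_alt]
  by_cases h : ((text.toList.length : Int) ≤ maxl)
  · rw [if_pos h, if_pos h]
  · rw [if_neg h, if_neg h]
    have hml : 1 ≤ maxl := by
      rcases hpre with hml | hle
      · exact hml
      · exact absurd (by simpa using hle) h
    have hlen : 1 ≤ text.toList.length := by
      by_contra hc
      exact h (by push_cast; omega)
    have hmain := pvMain text.toList maxl hml (text.toList.length + 1) 0 0 []
      (le_refl 0) (by push_cast; omega) (by omega) (by omega) (by omega)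
    simp only [List.drop_zero, Nat.sub_zero, List.take_length, Nat.cast_zero] at hmain
    rw [hmain]
    rfl
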